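-- pv_equiv track=rewrite | github.com/shemIA-Hack-Nation/praxis-ai | backend/app/agents/papergen/orchestrator_papergen.py | _generate_results_placeholder
-- ===== SOURCE A (Python) =====
-- from typing import TypedDict, List, Dict, Any, Optional, Union
--
-- def _generate_results_placeholder(cells: List[Dict]) -> str:
--     """Generate placeholder results section"""
--     results = "## Results\n\n"
--
--     plot_count = sum(1 for cell in cells if cell.get("type") == "output_plot")
--     text_count = sum(1 for cell in cells if cell.get("type") == "output_text")
--
--     if plot_count > 0:
--         results += f"The analysis generated {plot_count} visualization(s) showing the model performance.\n\n"
--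
--     if text_count > 0:
--         results += f"Numerical results from {text_count} output(s) demonstrate:\n\n"
--         for cell in cells:
--             if cell.get("type") == "output_text":
--                 content = str(cell.get("content", ""))[:100]
--                 results += f"- {content}...\n"
--
--     if not cells:
--         results += "*Results will be generated from output cells by ResultsWriter agent.*\n"
--
--     return results
-- ===== SOURCE B (Python) =====
-- def _generate_results_placeholder(cells):
--     """Generate placeholder results section (single pass over cells)."""
--     plot_count = 0
--     text_contents = []
--     for cell in cells:
--         t = cell.get("type")
--         if t == "output_plot":
--             plot_count += 1
--         elif t == "output_text":
--             text_contents.append(str(cell.get("content", ""))[:100])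
--     text_count = len(text_contents)
--
--     parts = ["## Results\n\n"]
--     if plot_count > 0:
--         parts.append(f"The analysis generated {plot_count} visualization(s) showing the model performance.\n\n")
--     if text_count > 0:
--         parts.append(f"Numerical results from {text_count} output(s) demonstrate:\n\n")
--         parts.append("".join(f"- {c}...\n" for c in text_contents))
--     if not cells:
--         parts.append("*Results will be generated from output cells by ResultsWriter agent.*\n")
--     return "".join(parts)
-- ===== Notes on version B (the rewrite author's own statement) =====
-- stated objective: simpler
-- what changed: Replaces A's three separate scans of cells (two counting passes plus a rendering loop) with one pass maintaining plot_count and the list of truncated text contents, then assembles the result once from a parts list joined at the end.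
import Mathlib
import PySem

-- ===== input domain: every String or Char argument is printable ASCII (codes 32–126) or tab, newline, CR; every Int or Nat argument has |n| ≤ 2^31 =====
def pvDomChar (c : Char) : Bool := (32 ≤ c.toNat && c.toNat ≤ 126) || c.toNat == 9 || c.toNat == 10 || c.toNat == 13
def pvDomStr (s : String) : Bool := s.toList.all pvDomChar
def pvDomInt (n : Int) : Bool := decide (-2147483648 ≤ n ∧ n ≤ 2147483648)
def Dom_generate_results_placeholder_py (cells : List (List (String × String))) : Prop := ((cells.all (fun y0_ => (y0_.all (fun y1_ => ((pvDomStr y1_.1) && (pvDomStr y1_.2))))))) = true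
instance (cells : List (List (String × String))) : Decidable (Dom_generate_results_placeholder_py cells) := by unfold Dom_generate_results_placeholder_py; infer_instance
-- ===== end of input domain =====

-- B replaces A's three separate scans of cells (two counting passes and a rendering loop)
-- by one pass collecting plot_count and the truncated text contents, then assembles the
-- markdown once from a parts list ("".join); objective: simpler.


-- ===== PORT A =====
-- literal transliteration of _generate_results_placeholder: two counting passes, then
-- conditional appends and a third loop over cells rendering the text cells.
def generate_results_placeholder_py (cells : List (List (String × String))) : String :=
  let results := "## Results\n\n"
  let plot_count : Int := cells.foldl
    (fun acc cell => if (PySem.Dict.mk cell).get? "type" == some "output_plot" then acc + 1 else acc) 0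
  let text_count : Int := cells.foldl
    (fun acc cell => if (PySem.Dict.mk cell).get? "type" == some "output_text" then acc + 1 else acc) 0
  let results := if plot_count > 0 then
      results ++ ("The analysis generated " ++ PySem.Int.toStr plot_count ++ " visualization(s) showing the model performance.\n\n")
    else results
  let results := if text_count > 0 then
      cells.foldl
        (fun acc cell => if (PySem.Dict.mk cell).get? "type" == some "output_text" then
            acc ++ ("- " ++ PySem.Str.slice ((PySem.Dict.mk cell).getD "content" "") none (some 100) ++ "...\n")
          else acc)
        (results ++ ("Numerical results from " ++ PySem.Int.toStr text_count ++ " output(s) demonstrate:\n\n"))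
    else results
  if cells = [] then results ++ "*Results will be generated from output cells by ResultsWriter agent.*\n" else results

-- ===== PORT B =====
-- transliteration of Source B: one pass maintaining (plot_count, text_contents), then "".join over parts.
def generate_results_placeholder_py_alt (cells : List (List (String × String))) : String :=
  let st : Int × List String := cells.foldl
    (fun (s : Int × List String) cell =>
      let t := (PySem.Dict.mk cell).get? "type"
      if t == some "output_plot" then (s.1 + 1, s.2)
      else if t == some "output_text" then
        (s.1, s.2 ++ [PySem.Str.slice ((PySem.Dict.mk cell).getD "content" "") none (some 100)])
      else s)
    (0, [])
  let plot_count := st.1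
  let text_contents := st.2
  let text_count : Int := text_contents.length
  let parts := ["## Results\n\n"]
  let parts := if plot_count > 0 then
      parts ++ ["The analysis generated " ++ PySem.Int.toStr plot_count ++ " visualization(s) showing the model performance.\n\n"]
    else parts
  let parts := if text_count > 0 then
      parts ++ ["Numerical results from " ++ PySem.Int.toStr text_count ++ " output(s) demonstrate:\n\n",
                PySem.Str.join "" (text_contents.map (fun c => "- " ++ c ++ "...\n"))]
    else parts
  let parts := if cells = [] then
      parts ++ ["*Results will be generated from output cells by ResultsWriter agent.*\n"]
    else parts
  PySem.Str.join "" parts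

-- ===== PRECONDITION & SPEC =====
def Spec_generate_results_placeholder_py (cells : List (List (String × String))) (out : String) : Prop := out = generate_results_placeholder_py_alt cells
instance (cells : List (List (String × String))) (out : String) : Decidable (Spec_generate_results_placeholder_py cells out) := by unfold Spec_generate_results_placeholder_py; infer_instance

-- ===== CLAIM (what is proved, stated in full; the proofs are below) =====
def Claim_equal_generate_results_placeholder_py : Prop := ∀ (cells : List (List (String × String))), Dom_generate_results_placeholder_py cells → Spec_generate_results_placeholder_py cells (generate_results_placeholder_py cells)

-- ===== LEMMAS AND PROOFS =====

-- shorthand predicates used only by the proofs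
def pvIsTy (t : String) (cell : List (String × String)) : Bool :=
  (PySem.Dict.mk cell).get? "type" == some t

def pvTrunc (cell : List (String × String)) : String :=
  PySem.Str.slice ((PySem.Dict.mk cell).getD "content" "") none (some 100)

theorem pv_join_nil : PySem.Str.join "" [] = "" := by
  simp [PySem.Str.join]

theorem pv_join_cons (a : String) (xs : List String) :
    PySem.Str.join "" (a :: xs) = a ++ PySem.Str.join "" xs := by
  cases xs with
  | nil => simp [PySem.Str.join]
  | cons y ys => simp [PySem.Str.join, PySem.Chars.join_cons_cons]

-- A's counting pass equals filter-length
theorem pv_count (t : String) (cells : List (List (String × String))) (a : Int) :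
    cells.foldl (fun acc cell => if (PySem.Dict.mk cell).get? "type" == some t then acc + 1 else acc) a
      = a + ((cells.filter (pvIsTy t)).length : Int) := by
  induction cells generalizing a with
  | nil => simp
  | cons c cs ih =>
    rw [List.foldl_cons]
    rcases hb : ((PySem.Dict.mk c).get? "type" == some t) with _ | _
    · rw [if_neg (by simp), ih, List.filter_cons, if_neg (by simp [pvIsTy, hb])]
    · rw [if_pos rfl, ih, List.filter_cons, if_pos (by simp [pvIsTy, hb])]
      simp only [List.length_cons]
      push_cast; ring

-- A's rendering loop appends the joined rendered text cells
theorem pv_render (cells : List (List (String × String))) (a : String) :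
    cells.foldl
      (fun acc cell => if (PySem.Dict.mk cell).get? "type" == some "output_text" then
          acc ++ ("- " ++ PySem.Str.slice ((PySem.Dict.mk cell).getD "content" "") none (some 100) ++ "...\n")
        else acc) a
      = a ++ PySem.Str.join ""
          (((cells.filter (pvIsTy "output_text")).map pvTrunc).map (fun c => "- " ++ c ++ "...\n")) := by
  induction cells generalizing a with
  | nil => simp [PySem.Str.join]
  | cons c cs ih =>
    rw [List.foldl_cons]
    rcases hb : ((PySem.Dict.mk c).get? "type" == some "output_text") with _ | _
    · rw [if_neg (by simp), ih, List.filter_cons, if_neg (by simp [pvIsTy, hb])]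
    · rw [if_pos rfl, ih, List.filter_cons, if_pos (by simp [pvIsTy, hb]), List.map_cons,
        List.map_cons, pv_join_cons]
      simp [pvTrunc, String.append_assoc]

-- B's single pass computes (plot count, truncated text contents)
theorem pv_fold (cells : List (List (String × String))) (p : Int) (l : List String) :
    cells.foldl
      (fun (s : Int × List String) cell =>
        let t := (PySem.Dict.mk cell).get? "type"
        if t == some "output_plot" then (s.1 + 1, s.2)
        else if t == some "output_text" then
          (s.1, s.2 ++ [PySem.Str.slice ((PySem.Dict.mk cell).getD "content" "") none (some 100)])
        else s)
      (p, l)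
      = (p + ((cells.filter (pvIsTy "output_plot")).length : Int),
         l ++ (cells.filter (pvIsTy "output_text")).map pvTrunc) := by
  induction cells generalizing p l with
  | nil => simp
  | cons c cs ih =>
    rw [List.foldl_cons]
    rcases hp : ((PySem.Dict.mk c).get? "type" == some "output_plot") with _ | _
    · rcases ht : ((PySem.Dict.mk c).get? "type" == some "output_text") with _ | _
      · simp only [hp, ht]
        rw [if_neg (by simp), if_neg (by simp), ih, List.filter_cons, List.filter_cons,
          if_neg (by simp [pvIsTy, hp]), if_neg (by simp [pvIsTy, ht])]
      · simp only [hp, ht]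
        rw [if_neg (by simp), if_pos trivial, ih, List.filter_cons, List.filter_cons,
          if_neg (by simp [pvIsTy, hp]), if_pos (by simp [pvIsTy, ht]), List.map_cons]
        simp [pvTrunc]
    · have ht : ((PySem.Dict.mk c).get? "type" == some "output_text") = false := by
        simp only [beq_iff_eq] at hp ⊢; simp [hp]
      simp only [hp, ht]
      rw [if_pos trivial, ih, List.filter_cons, List.filter_cons,
        if_pos (by simp [pvIsTy, hp]), if_neg (by simp [pvIsTy, ht])]
      simp only [List.length_cons, Prod.mk.injEq]
      exact ⟨by push_cast; ring, trivial⟩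

-- ===== VERDICT (by name: the statement is the Claim_ definition above) =====
theorem generate_results_placeholder_py_spec : Claim_equal_generate_results_placeholder_py := by
  intro cells _
  unfold Spec_generate_results_placeholder_py generate_results_placeholder_py generate_results_placeholder_py_alt
  rw [pv_count "output_plot" cells 0, pv_count "output_text" cells 0, pv_fold cells 0 []]
  simp only [Int.zero_add, List.nil_append]
  have hTlen : (((cells.filter (pvIsTy "output_text")).length : Nat) : Int)
      = ((((cells.filter (pvIsTy "output_text")).map pvTrunc).length : Nat) : Int) := by simp
  rw [hTlen]
  by_cases hE : cells = []
  · subst hE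
    simp [pv_join_cons, pv_join_nil]
  · by_cases hPpos : (((cells.filter (pvIsTy "output_plot")).length : Nat) : Int) > 0 <;>
      by_cases hTpos : ((((cells.filter (pvIsTy "output_text")).map pvTrunc).length : Nat) : Int) > 0
    · simp only [if_pos hPpos, if_pos hTpos, if_neg hE]
      rw [pv_render]
      simp [pv_join_cons, pv_join_nil, String.append_assoc]
    · simp only [if_pos hPpos, if_neg hTpos, if_neg hE]
      simp [pv_join_cons, pv_join_nil, String.append_assoc]
    · simp only [if_neg hPpos, if_pos hTpos, if_neg hE]
      rw [pv_render]
      simp [pv_join_cons, pv_join_nil, String.append_assoc]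
    · simp only [if_neg hPpos, if_neg hTpos, if_neg hE]
      simp [pv_join_cons, pv_join_nil]
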